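-- pv_equiv track=rewrite | github.com/zzy0816/LLM_Resume | scripts/parser.py | parse_projects_blocks
-- ===== SOURCE A (Python) =====
-- def parse_projects_blocks(raw_lines: list[str]) -> list[dict]:
--     """
--     将原始文本行拆分为项目块（title + content）
--     - 标题行：不以动词开头，长度小于100
--     - 内容行：以 '-' 开头或动词开头的描述
--     """
--     projects = []
--     current_title = None
--     current_content = []
--
--     action_verbs = ("built", "created", "used", "collected", "led", "fine-tuned", "developed")
--
--     for line in raw_lines:
--         line = line.strip()
--         if not line:
--             continue
--
--         # 新标题行条件：不以动作动词开头，长度<100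
--         if not line.lower().startswith(action_verbs) and len(line) <= 100:
--             # 保存前一个项目
--             if current_title:
--                 projects.append({
--                     "project_title": current_title,
--                     "project_content": "\n".join(current_content)
--                 })
--             current_title = line
--             current_content = []
--         else:
--             current_content.append(line)
--
--     # 保存最后一个项目
--     if current_title:
--         projects.append({
--             "project_title": current_title,
--             "project_content": "\n".join(current_content)
--         })
--
--     return projects
-- ===== SOURCE B (Python) =====
-- def parse_projects_blocks(raw_lines: list[str]) -> list[dict]:
--     action_verbs = ("built", "created", "used", "collected", "led", "fine-tuned", "developed")
--     lines = [s for s in (ln.strip() for ln in raw_lines) if s]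
--     tidx = [i for i, s in enumerate(lines)
--             if not s.lower().startswith(action_verbs) and len(s) <= 100]
--     bounds = tidx[1:] + [len(lines)]
--     return [{"project_title": lines[i],
--              "project_content": "\n".join(lines[i + 1:j])}
--             for i, j in zip(tidx, bounds)]
-- ===== Notes on version B (the rewrite author's own statement) =====
-- stated objective: alternative
-- what changed: B replaces A's accumulate-and-flush state machine (current_title/current_content mutated per line) with a two-phase index computation: normalize lines, collect all title indices in one scan, then build each block by slicing between consecutive title indices.
import Mathlib
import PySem

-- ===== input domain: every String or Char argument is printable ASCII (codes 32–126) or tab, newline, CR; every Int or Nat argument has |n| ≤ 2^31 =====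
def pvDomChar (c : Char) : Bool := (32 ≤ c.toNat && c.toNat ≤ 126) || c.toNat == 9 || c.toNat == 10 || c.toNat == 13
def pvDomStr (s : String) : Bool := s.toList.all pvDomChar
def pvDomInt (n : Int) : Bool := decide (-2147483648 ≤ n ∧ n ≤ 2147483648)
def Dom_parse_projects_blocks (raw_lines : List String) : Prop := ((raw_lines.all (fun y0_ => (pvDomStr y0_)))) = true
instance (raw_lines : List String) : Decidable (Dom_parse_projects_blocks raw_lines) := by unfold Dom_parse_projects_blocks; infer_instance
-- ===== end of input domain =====

-- B rebuilds the blocks from title indices and slices instead of A's accumulate-and-flush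
-- state machine; same cost, different decomposition ("alternative").

-- ===== PORT A =====
def pvVerbs : List String := ["built", "created", "used", "collected", "led", "fine-tuned", "developed"]

-- line.lower().startswith(action_verbs) negated, and len(line) <= 100 (the title test both Pythons share)
def pvIsTitle (s : String) : Bool :=
  !(pvVerbs.any (fun v => PySem.Str.startswith (PySem.Str.lower s) v)) && PySem.Str.len s ≤ 100

-- 'if current_title: projects.append({...})' (Python truthiness: None and "" are falsy)
def pvFlushA (projects : List (List (String × String))) (t? : Option String)
    (content : List String) : List (List (String × String)) :=
  match t? with
  | none => projects
  | some t =>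
    if t = "" then projects
    else projects ++ [[("project_title", t), ("project_content", PySem.Str.join "\n" content)]]

def parse_projects_blocks (raw_lines : List String) : List (List (String × String)) :=
  let fin := raw_lines.foldl (fun st line =>
      let line := PySem.Str.strip line
      if line = "" then st
      else if pvIsTitle line then (pvFlushA st.1 st.2.1 st.2.2, some line, ([] : List String))
      else (st.1, st.2.1, st.2.2 ++ [line]))
    (([] : List (List (String × String))), (none : Option String), ([] : List String))
  pvFlushA fin.1 fin.2.1 fin.2.2

-- ===== PORT B =====
def parse_projects_blocks_alt (raw_lines : List String) : List (List (String × String)) :=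
  let lines := (raw_lines.map PySem.Str.strip).filter (fun s => s != "")
  let tidx := ((PySem.List.enumerate lines 0).filter (fun p => pvIsTitle p.2)).map (fun p => p.1)
  let bounds := tidx.drop 1 ++ [(lines.length : Int)]
  (tidx.zip bounds).map (fun ij =>
    [("project_title", PySem.List.pyGetD lines ij.1 ""),
     ("project_content", PySem.Str.join "\n" (PySem.List.slice lines (some (ij.1 + 1)) (some ij.2)))])

-- ===== PRECONDITION & SPEC =====
def Spec_parse_projects_blocks (raw_lines : List String) (out : List (List (String × String))) : Prop := out = parse_projects_blocks_alt raw_lines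
instance (raw_lines : List String) (out : List (List (String × String))) : Decidable (Spec_parse_projects_blocks raw_lines out) := by unfold Spec_parse_projects_blocks; infer_instance

-- ===== CLAIM (what is proved, stated in full; the proofs are below) =====
def Claim_equal_parse_projects_blocks : Prop := ∀ (raw_lines : List String), Dom_parse_projects_blocks raw_lines → Spec_parse_projects_blocks raw_lines (parse_projects_blocks raw_lines)

-- ===== LEMMAS AND PROOFS =====

def pvBlock (t : String) (content : List String) : List (String × String) :=
  [("project_title", t), ("project_content", PySem.Str.join "\n" content)]

-- the bridge recursion both ports are reduced to (runs over the cleaned line list)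
def pvGo (t : String) (acc : List String) : List String → List (List (String × String))
  | [] => [pvBlock t acc]
  | x :: xs => if pvIsTitle x then pvBlock t acc :: pvGo x [] xs else pvGo t (acc ++ [x]) xs

def pvTop : List String → List (List (String × String))
  | [] => []
  | x :: xs => if pvIsTitle x then pvGo x [] xs else pvTop xs

-- B-side abbreviations
def pvTf (ls : List String) : List Int :=
  ((PySem.List.enumerate ls 0).filter (fun p => pvIsTitle p.2)).map (fun p => p.1)

def pvBlockAt (ls : List String) (ij : Int × Int) : List (String × String) :=
  [("project_title", PySem.List.pyGetD ls ij.1 ""),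
   ("project_content", PySem.Str.join "\n" (PySem.List.slice ls (some (ij.1 + 1)) (some ij.2)))]

def pvBcore (ls : List String) : List (List (String × String)) :=
  ((pvTf ls).zip ((pvTf ls).drop 1 ++ [(ls.length : Int)])).map (pvBlockAt ls)

theorem pvTf_shift (ls : List String) (s : Int) :
    ((PySem.List.enumerate ls s).filter (fun p => pvIsTitle p.2)).map (fun p => p.1)
      = (pvTf ls).map (· + s) := by
  induction ls generalizing s with
  | nil => simp [pvTf]
  | cons x xs ih =>
    simp only [pvTf, PySem.List.enumerate_cons, List.filter_cons]
    by_cases hx : pvIsTitle x <;>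
      simp only [hx, Bool.false_eq_true, if_true, if_false, ite_false, ite_true, List.map_cons] <;>
      rw [ih (s+1), ih (0+1)] <;>
      simp only [List.map_cons, List.map_map, zero_add] <;>
      [skip; skip]
    · refine List.cons_eq_cons.mpr ⟨rfl, ?_⟩
      refine List.map_congr_left ?_
      intro a _; simp [Function.comp]; ring
    · refine List.map_congr_left ?_
      intro a _; simp [Function.comp]; ring

theorem pvTf_cons (x : String) (ls : List String) :
    pvTf (x :: ls) = if pvIsTitle x then 0 :: (pvTf ls).map (· + 1) else (pvTf ls).map (· + 1) := by
  have h := pvTf_shift ls 1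
  simp only [pvTf, PySem.List.enumerate_cons, List.filter_cons, zero_add]
  by_cases hx : pvIsTitle x <;> simp only [hx, Bool.false_eq_true, if_true, if_false] <;>
    simp only [List.map_cons, pvTf] at h ⊢ <;> rw [h]


theorem pvTf_nonneg (ls : List String) : ∀ i ∈ pvTf ls, 0 ≤ i := by
  intro i hi
  simp only [pvTf, List.mem_map, List.mem_filter] at hi
  obtain ⟨p, ⟨hp, -⟩, rfl⟩ := hi
  rw [PySem.List.mem_enumerate_iff] at hp
  obtain ⟨k, hk, rfl⟩ := hp
  simp


theorem pvBlockAt_shift (x : String) (ls : List String) (i j : Int) (hi : 0 ≤ i) (hj : 0 ≤ j) :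
    pvBlockAt (x :: ls) (i + 1, j + 1) = pvBlockAt ls (i, j) := by
  obtain ⟨k, rfl⟩ := Int.eq_ofNat_of_zero_le hi
  obtain ⟨m, rfl⟩ := Int.eq_ofNat_of_zero_le hj
  simp only [pvBlockAt]
  have h1 : ((k : Int) + 1) = ((k + 1 : Nat) : Int) := by push_cast; ring
  have h2 : ((m : Int) + 1) = ((m + 1 : Nat) : Int) := by push_cast; ring
  have h3 : (((k + 1 : Nat) : Int) + 1) = ((k + 2 : Nat) : Int) := by push_cast; ring
  rw [h1, h2, h3, PySem.List.pyGetD_natCast, PySem.List.pyGetD_natCast,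
    PySem.List.slice_natCast, PySem.List.slice_natCast]
  simp only [List.getD_cons_succ, List.drop_succ_cons]
  have : m + 1 - (k + 2) = m - (k + 1) := by omega
  rw [this]


theorem pvHead_tf (ls : List String) :
    ((pvTf ls) ++ [(ls.length : Int)]).headI
      = ((ls.takeWhile (fun x => !pvIsTitle x)).length : Int) := by
  induction ls with
  | nil => simp [pvTf]
  | cons x ls ih =>
    rw [pvTf_cons]
    by_cases hx : pvIsTitle x
    · simp [hx]
    · simp only [hx, Bool.false_eq_true, if_false, List.takeWhile_cons, Bool.not_false, if_true,
        ite_true, ite_false]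
      cases htf : pvTf ls with
      | nil =>
        rw [htf] at ih; simp only [htf, List.map_nil, List.nil_append, List.headI] at ih ⊢
        simp only [List.length_cons, List.length_cons]
        push_cast at ih ⊢
        omega
      | cons a as =>
        rw [htf] at ih; simp only [htf, List.map_cons, List.cons_append, List.headI] at ih ⊢
        simp only [List.length_cons]
        push_cast at ih ⊢
        omega


theorem pvTakeTW (p : String → Bool) (l : List String) :
    l.take (l.takeWhile p).length = l.takeWhile p := by
  induction l with
  | nil => simp
  | cons x xs ih =>
    by_cases hx : p x <;> simp [List.takeWhile_cons, hx, ih]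

theorem pvShiftAll (x : String) (ls : List String) :
    (((pvTf ls).map (· + 1)).zip (((pvTf ls).map (· + 1)).drop 1 ++ [(ls.length : Int) + 1])).map
        (pvBlockAt (x :: ls))
      = pvBcore ls := by
  have hzip : ((pvTf ls).map (· + 1)).zip (((pvTf ls).map (· + 1)).drop 1 ++ [(ls.length : Int) + 1])
      = ((pvTf ls).zip ((pvTf ls).drop 1 ++ [(ls.length : Int)])).map
          (Prod.map (· + 1) (· + 1)) := by
    have h2 : ((pvTf ls).map (· + 1)).drop 1 ++ [(ls.length : Int) + 1]
        = ((pvTf ls).drop 1 ++ [(ls.length : Int)]).map (· + 1) := by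
      simp [List.map_drop]
    rw [h2, List.zip_map]
  rw [hzip, List.map_map, pvBcore]
  refine List.map_congr_left ?_
  intro ij hij
  obtain ⟨h1, h2⟩ := List.of_mem_zip hij
  have hi : 0 ≤ ij.1 := pvTf_nonneg ls _ h1
  have hj : 0 ≤ ij.2 := by
    rcases List.mem_append.mp h2 with h | h
    · exact pvTf_nonneg ls _ (List.mem_of_mem_drop h)
    · simp only [List.mem_singleton] at h; rw [h]; positivity
  simpa [Function.comp, Prod.map] using pvBlockAt_shift x ls ij.1 ij.2 hi hj

theorem pvBcore_cons (x : String) (ls : List String) :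
    pvBcore (x :: ls) = if pvIsTitle x
      then pvBlock x (ls.takeWhile (fun y => !pvIsTitle y)) :: pvBcore ls
      else pvBcore ls := by
  by_cases hx : pvIsTitle x <;>
    simp only [hx, if_true, if_false, Bool.false_eq_true, ite_true, ite_false]
  · -- title head: first block then the shifted rest
    unfold pvBcore
    rw [pvTf_cons]
    simp only [hx, if_true, List.drop_succ_cons, List.drop_zero, List.length_cons]
    have hlen : ((ls.length + 1 : Nat) : Int) = (ls.length : Int) + 1 := by push_cast; ring
    rw [hlen]
    have hzipcons :
        ((0 : Int) :: (pvTf ls).map (· + 1)).zip ((pvTf ls).map (· + 1) ++ [(ls.length : Int) + 1])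
          = ((0 : Int), ((pvTf ls) ++ [(ls.length : Int)]).headI + 1)
            :: ((pvTf ls).map (· + 1)).zip (((pvTf ls).map (· + 1)).drop 1 ++ [(ls.length : Int) + 1]) := by
      cases htf : pvTf ls with
      | nil => simp
      | cons a as => simp
    rw [hzipcons, List.map_cons, pvShiftAll]
    congr 1
    -- the first block is pvBlock x (takeWhile ¬title ls)
    rw [pvHead_tf]
    unfold pvBlockAt pvBlock
    have h0 : PySem.List.pyGetD (x :: ls) (0 : Int) "" = x := by
      simp [PySem.List.pyGetD_zero_cons]
    rw [h0]
    have h1 : ((ls.takeWhile (fun y => !pvIsTitle y)).length : Int) + 1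
        = (((ls.takeWhile (fun y => !pvIsTitle y)).length + 1 : Nat) : Int) := by push_cast; ring
    have h2 : (0 : Int) + 1 = ((1 : Nat) : Int) := by norm_num
    rw [h1, h2, PySem.List.slice_natCast]
    simp only [List.drop_succ_cons, List.drop_zero]
    have h3 : (ls.takeWhile (fun y => !pvIsTitle y)).length + 1 - 1 = (ls.takeWhile (fun y => !pvIsTitle y)).length := by omega
    rw [h3, pvTakeTW]
  · unfold pvBcore
    rw [pvTf_cons]
    simp only [hx, Bool.false_eq_true, if_false, List.length_cons]
    have hlen : ((ls.length + 1 : Nat) : Int) = (ls.length : Int) + 1 := by push_cast; ring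
    rw [hlen, pvShiftAll]
    rfl


theorem pvTop_dropWhile (ls : List String) :
    pvTop (ls.dropWhile (fun y => !pvIsTitle y)) = pvTop ls := by
  induction ls with
  | nil => rfl
  | cons x xs ih =>
    by_cases hx : pvIsTitle x <;> simp [List.dropWhile_cons, hx, pvTop, ih]


theorem pvGo_eq (ls : List String) (t : String) (acc : List String) :
    pvGo t acc ls = pvBlock t (acc ++ ls.takeWhile (fun y => !pvIsTitle y))
        :: pvTop (ls.dropWhile (fun y => !pvIsTitle y)) := by
  induction ls generalizing t acc with
  | nil => simp [pvGo, pvTop]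
  | cons x xs ih =>
    by_cases hx : pvIsTitle x
    · simp [pvGo, hx, List.takeWhile_cons, List.dropWhile_cons, pvTop]
    · simp only [pvGo, hx, Bool.false_eq_true, if_false, ite_false, List.takeWhile_cons,
        List.dropWhile_cons, Bool.not_false, if_true, ite_true]
      rw [ih]
      simp


theorem pvBcore_eq_top (ls : List String) : pvBcore ls = pvTop ls := by
  induction ls with
  | nil => rfl
  | cons x xs ih =>
    rw [pvBcore_cons]
    by_cases hx : pvIsTitle x
    · simp only [hx, if_true, ite_true, pvTop]
      rw [pvGo_eq, ih, pvTop_dropWhile]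
      simp
    · simp only [hx, Bool.false_eq_true, if_false, ite_false, pvTop]
      rw [ih]


-- A-side: the core step on an already stripped, nonempty line
def pvStepCore (st : List (List (String × String)) × Option String × List String)
    (line : String) : List (List (String × String)) × Option String × List String :=
  if pvIsTitle line then (pvFlushA st.1 st.2.1 st.2.2, some line, ([] : List String))
  else (st.1, st.2.1, st.2.2 ++ [line])

theorem pvFoldA (raw : List String) (st : List (List (String × String)) × Option String × List String) :
    raw.foldl (fun st line =>
      let line := PySem.Str.strip line
      if line = "" then st
      else if pvIsTitle line then (pvFlushA st.1 st.2.1 st.2.2, some line, ([] : List String))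
      else (st.1, st.2.1, st.2.2 ++ [line])) st
    = ((raw.map PySem.Str.strip).filter (fun s => s != "")).foldl pvStepCore st := by
  induction raw generalizing st with
  | nil => rfl
  | cons r rs ih =>
    simp only [List.foldl_cons, List.map_cons, List.filter_cons]
    by_cases hr : PySem.Str.strip r = ""
    · simp only [hr]
      simp [ih, pvStepCore]
    · simp only [hr]
      have : (PySem.Str.strip r != "") = true := by simp [hr]
      simp only [this, if_true, List.foldl_cons, ite_true]
      rw [← ih]
      simp [pvStepCore, hr]


theorem pvFoldGo (ls : List String) (p : List (List (String × String))) (t : String)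
    (acc : List String) (ht : t ≠ "") (hls : ∀ x ∈ ls, x ≠ "") :
    pvFlushA (ls.foldl pvStepCore (p, some t, acc)).1
        (ls.foldl pvStepCore (p, some t, acc)).2.1
        (ls.foldl pvStepCore (p, some t, acc)).2.2
      = p ++ pvGo t acc ls := by
  induction ls generalizing p t acc with
  | nil => simp [pvGo, pvFlushA, ht, pvBlock]
  | cons x xs ih =>
    have hx0 : x ≠ "" := hls x (by simp)
    have hxs : ∀ y ∈ xs, y ≠ "" := fun y hy => hls y (by simp [hy])
    by_cases hx : pvIsTitle x
    · simp only [List.foldl_cons, pvStepCore, hx, if_true, ite_true]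
      have hp : pvFlushA p (some t) acc
          = p ++ [[("project_title", t), ("project_content", PySem.Str.join "
" acc)]] := by
        simp [pvFlushA, ht]
      rw [hp, ih _ _ _ hx0 hxs]
      simp [pvGo, hx, pvBlock]
    · simp only [List.foldl_cons, pvStepCore, hx, Bool.false_eq_true, if_false, ite_false]
      rw [ih _ _ _ ht hxs]
      simp [pvGo, hx]

theorem pvFoldTop (ls : List String) (p : List (List (String × String))) (acc : List String)
    (hls : ∀ x ∈ ls, x ≠ "") :
    pvFlushA (ls.foldl pvStepCore (p, none, acc)).1
        (ls.foldl pvStepCore (p, none, acc)).2.1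
        (ls.foldl pvStepCore (p, none, acc)).2.2
      = p ++ pvTop ls := by
  induction ls generalizing p acc with
  | nil => simp [pvTop, pvFlushA]
  | cons x xs ih =>
    have hx0 : x ≠ "" := hls x (by simp)
    have hxs : ∀ y ∈ xs, y ≠ "" := fun y hy => hls y (by simp [hy])
    by_cases hx : pvIsTitle x
    · simp only [List.foldl_cons, pvStepCore, hx, if_true, ite_true]
      have hp : pvFlushA p none acc = p := rfl
      rw [hp, pvFoldGo xs p x [] hx0 hxs]
      simp [pvTop, hx]
    · simp only [List.foldl_cons, pvStepCore, hx, Bool.false_eq_true, if_false, ite_false]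
      rw [ih _ _ hxs]
      simp [pvTop, hx]

-- ===== VERDICT (by name: the statement is the Claim_ definition above) =====
theorem parse_projects_blocks_spec : Claim_equal_parse_projects_blocks := by
  intro raw _
  show parse_projects_blocks raw = parse_projects_blocks_alt raw
  have hlines : ∀ x ∈ (raw.map PySem.Str.strip).filter (fun s => s != ""), x ≠ "" := by
    intro x hx
    simpa using (List.mem_filter.mp hx).2
  have hB : parse_projects_blocks_alt raw
      = pvBcore ((raw.map PySem.Str.strip).filter (fun s => s != "")) := rfl
  rw [hB, pvBcore_eq_top]
  unfold parse_projects_blocks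
  rw [pvFoldA]
  simpa using pvFoldTop ((raw.map PySem.Str.strip).filter (fun s => s != "")) [] [] hlines
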